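-- pv_equiv track=rewrite | github.com/usc-sail/mica-character-attribution | 50-prepare-data/53-contexts.py | split_text_into_paragraphs_and_paragraph_spans
-- ===== SOURCE A (Python) =====
-- from typing import List, Tuple
--
-- def split_text_into_paragraphs_and_paragraph_spans(
--         text: str, spans: List[List[int]], min_paragraph_size: int) -> Tuple[List[str], List[List[List[int]]]]:
--     """
--     Split text and character spans into paragraphs and list of character spans for each paragraph
--     """
--
--     # split the text into segments separated by newline character
--     segments = text.split("\n")
--     segment_sizes = [len(segment.split()) for segment in segments]
--
--     # i points to the current segment not yet included in any paragraphs
--     # k points to the current span not yet included in the paragraph spans of any paragraph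
--     i = 0
--     k = 0
--     paragraphs = []
--     paragraph_spans_list = []
--
--     while i < len(segments):
--
--         # find j such that segments[i ... j - 1] makes the new paragraph
--         j = i + 1
--         paragraph_size = segment_sizes[i]
--         while j < len(segments) and paragraph_size + segment_sizes[j] < min_paragraph_size:
--             paragraph_size += segment_sizes[j]
--             j += 1
--         paragraph = "\n".join(segments[i: j])
--         i = j
--
--         # find k such that spans[k ... l - 1] appear inside the new paragraph
--         l = k
--         while l < len(spans) and spans[l][1] < len(paragraph):
--             l += 1
--         paragraph_spans = spans[k: l]
--         k = l
--
--         # offset succeeding spans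
--         for l in range(k, len(spans)):
--             start, end = spans[l]
--             start -= len(paragraph) + 1 # the +1 is for the trailing \n
--             end -= len(paragraph) + 1
--             spans[l] = [start, end]
--
--         paragraphs.append(paragraph)
--         paragraph_spans_list.append(paragraph_spans)
--
--     return paragraphs, paragraph_spans_list
-- ===== SOURCE B (Python) =====
-- def split_text_into_paragraphs_and_paragraph_spans(text, spans, min_paragraph_size):
--     # Staged pipeline instead of A's single interleaved loop: (1) group segments into
--     # paragraphs with one fold, (2) precompute each paragraph's start offset, (3) one
--     # two-pointer pass over the spans, rebasing each span once; never mutates `spans`.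
--     segments = text.split("\n")
--     # stage 1: group segments into paragraphs
--     paragraphs = []
--     group = []
--     size = 0
--     for seg in segments:
--         w = len(seg.split())
--         if group and not (size + w < min_paragraph_size):
--             paragraphs.append("\n".join(group))
--             group = []
--             size = 0
--         group.append(seg)
--         size += w
--     paragraphs.append("\n".join(group))
--     # stage 2: start offset of each paragraph in the original text
--     bases = []
--     b = 0
--     for p in paragraphs:
--         bases.append(b)
--         b += len(p) + 1
--     # stage 3: two-pointer sweep over the spans; emit a bucket whenever the
--     # paragraph pointer advances
--     done = []
--     cur = []
--     pi = 0
--     for s in spans: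
--         while pi < len(paragraphs) and not (s[1] - bases[pi] < len(paragraphs[pi])):
--             done.append(cur)
--             cur = []
--             pi += 1
--         if pi < len(paragraphs):
--             cur.append([v - bases[pi] for v in s])
--     while pi < len(paragraphs):
--         done.append(cur)
--         cur = []
--         pi += 1
--     return paragraphs, done
-- ===== Notes on version B (the rewrite author's own statement) =====
-- stated objective: alternative
-- what changed: A interleaves everything in one while loop and after each paragraph rewrites every remaining span in place (O(P*S) span rewrites); B is a staged pipeline: a single fold groups segments into paragraphs, paragraph start offsets are precomputed, and one two-pointer sweep over the spans rebases each span exactly once, never mutating the input list.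
-- outside the precondition, e.g. on split_text_into_paragraphs_and_paragraph_spans('a', [[0, 0, 5]], 1): A returns (['a'], [[[0, 0, 5]]]), B returns (['a'], [[[0, 0, 5]]])
import Mathlib
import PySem

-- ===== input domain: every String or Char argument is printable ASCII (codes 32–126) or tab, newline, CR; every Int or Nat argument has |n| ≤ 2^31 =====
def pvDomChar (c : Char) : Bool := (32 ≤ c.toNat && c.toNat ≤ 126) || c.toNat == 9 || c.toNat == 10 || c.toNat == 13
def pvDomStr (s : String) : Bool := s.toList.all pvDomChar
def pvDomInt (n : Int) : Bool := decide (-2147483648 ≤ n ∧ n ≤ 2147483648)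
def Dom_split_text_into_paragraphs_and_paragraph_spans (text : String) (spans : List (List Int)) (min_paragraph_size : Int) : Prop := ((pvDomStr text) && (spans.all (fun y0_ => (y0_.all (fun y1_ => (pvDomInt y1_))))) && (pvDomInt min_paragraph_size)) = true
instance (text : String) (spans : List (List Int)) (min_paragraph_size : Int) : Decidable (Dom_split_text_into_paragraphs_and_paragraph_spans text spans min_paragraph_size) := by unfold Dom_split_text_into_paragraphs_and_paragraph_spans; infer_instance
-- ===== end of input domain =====

-- B replaces A's single interleaved loop (which after each paragraph rewrites every remaining span
-- of the argument list in place) by a staged pipeline: one fold groups the segments into paragraphs,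
-- paragraph start offsets are precomputed, and one two-pointer sweep over the spans rebases each span
-- once; A mutates the `spans` argument in place, B does not — the equivalence proved here is about
-- the RETURN value only.

-- ===== PORT A =====
-- inner while loop 'while j < len(segments) and paragraph_size + segment_sizes[j] < min_paragraph_size'
-- (fuel = segments.length - j; index j is in range whenever read, so List.getD is exact)
def pvA_findJ (sizes : List Int) (minp : Int) (j : Nat) (acc : Int) (fuel : Nat) : Nat × Int :=
  match fuel with
  | 0 => (j, acc)
  | f+1 =>
    if j < sizes.length && decide (acc + sizes.getD j 0 < minp) then
      pvA_findJ sizes minp (j+1) (acc + sizes.getD j 0) f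
    else (j, acc)

-- inner while loop 'while l < len(spans) and spans[l][1] < len(paragraph)'
-- (spans[l][1] is exact via getD since every admitted span has length 2)
def pvA_findL (spans : List (List Int)) (plen : Int) (l : Nat) (fuel : Nat) : Nat :=
  match fuel with
  | 0 => l
  | f+1 =>
    if l < spans.length && decide ((spans.getD l []).getD 1 0 < plen) then
      pvA_findL spans plen (l+1) f
    else l

-- 'for l in range(k, len(spans)): start, end = spans[l]; …; spans[l] = [start-d, end-d]'
-- (the unpack 'start, end = spans[l]' is exact via getD since every admitted span has length 2)
def pvA_adjust (spans : List (List Int)) (k : Nat) (d : Int) : List (List Int) :=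
  spans.take k ++ (spans.drop k).map (fun s => [s.getD 0 0 - d, s.getD 1 0 - d])

-- the outer while loop of A; fuel = len(segments) (i strictly increases each iteration)
def pvA_loop (segments : List String) (sizes : List Int) (minp : Int)
    (i k : Nat) (spans : List (List Int))
    (paras : List String) (psl : List (List (List Int))) (fuel : Nat) :
    List String × List (List (List Int)) :=
  match fuel with
  | 0 => (paras, psl)
  | f+1 =>
    if i < segments.length then
      let j := (pvA_findJ sizes minp (i+1) (sizes.getD i 0) (segments.length - (i+1))).1
      let paragraph := PySem.Str.join "\n" (PySem.List.slice segments (some (i:Int)) (some (j:Int)))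
      let plen := PySem.Str.len paragraph
      let l := pvA_findL spans plen k (spans.length - k)
      let pspans := PySem.List.slice spans (some (k:Int)) (some (l:Int))
      let spans' := pvA_adjust spans l (plen + 1)
      pvA_loop segments sizes minp j l spans' (paras ++ [paragraph]) (psl ++ [pspans]) f
    else (paras, psl)

def split_text_into_paragraphs_and_paragraph_spans (text : String) (spans : List (List Int)) (min_paragraph_size : Int) : List String × List (List (List Int)) :=
  let segments := (PySem.Str.split? text "\n").getD []   -- sep ≠ "": getD branch unreachable
  let sizes := segments.map (fun s => ((PySem.Str.split₀ s).length : Int))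
  pvA_loop segments sizes min_paragraph_size 0 0 spans [] [] segments.length

-- ===== PORT B =====
-- stage 1: 'for seg in segments: w = len(seg.split()); if group and not (size + w < min): emit; …'
-- one fold step over state (paragraphs, group, size)
def pvB_groupStep (minp : Int) (st : List String × List String × Int) (seg : String) : List String × List String × Int :=
  let w : Int := ((PySem.Str.split₀ seg).length : Int)
  let st := if !st.2.1.isEmpty && !decide (st.2.2 + w < minp) then
      (st.1 ++ [PySem.Str.join "\n" st.2.1], ([] : List String), (0 : Int))
    else st
  (st.1, st.2.1 ++ [seg], st.2.2 + w)

-- stage 2: 'for p in paragraphs: bases.append(b); b += len(p) + 1'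
def pvB_basesStep (st : List Int × Int) (p : String) : List Int × Int :=
  (st.1 ++ [st.2], st.2 + PySem.Str.len p + 1)

-- stage 3 inner while: 'while pi < len(paragraphs) and not (s[1] - bases[pi] < len(paragraphs[pi])):
--   done.append(cur); cur = []; pi += 1'   (fuel = paragraphs.length - pi; indices in range, getD exact)
def pvB_adv (paras : List String) (bases : List Int) (e : Int) (pi : Nat)
    (done : List (List (List Int))) (cur : List (List Int)) (fuel : Nat) :
    Nat × List (List (List Int)) × List (List Int) :=
  match fuel with
  | 0 => (pi, done, cur)
  | f+1 =>
    if pi < paras.length && !decide (e - bases.getD pi 0 < PySem.Str.len (paras.getD pi "")) then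
      pvB_adv paras bases e (pi+1) (done ++ [cur]) [] f
    else (pi, done, cur)

-- trailing 'while pi < len(paragraphs): done.append(cur); cur = []; pi += 1'
def pvB_flush (n pi : Nat) (done : List (List (List Int))) (cur : List (List Int)) (fuel : Nat) :
    List (List (List Int)) :=
  match fuel with
  | 0 => done
  | f+1 => if pi < n then pvB_flush n (pi+1) (done ++ [cur]) [] f else done

-- stage 3: 'for s in spans: <advance pointer>; if pi < len(paragraphs): cur.append([v - bases[pi] for v in s])'
def pvB_sweep (paras : List String) (bases : List Int) (spans : List (List Int)) (pi : Nat)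
    (done : List (List (List Int))) (cur : List (List Int)) : List (List (List Int)) :=
  match spans with
  | [] => pvB_flush paras.length pi done cur (paras.length - pi)
  | s :: rest =>
    let a := pvB_adv paras bases (s.getD 1 0) pi done cur (paras.length - pi)
    let cur' := if a.1 < paras.length then a.2.2 ++ [s.map (fun v => v - bases.getD a.1 0)] else a.2.2
    pvB_sweep paras bases rest a.1 a.2.1 cur'

def split_text_into_paragraphs_and_paragraph_spans_alt (text : String) (spans : List (List Int)) (min_paragraph_size : Int) : List String × List (List (List Int)) :=
  let segments := (PySem.Str.split? text "\n").getD []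
  let g := segments.foldl (pvB_groupStep min_paragraph_size) ([], [], 0)
  let paragraphs := g.1 ++ [PySem.Str.join "\n" g.2.1]
  let bases := (paragraphs.foldl pvB_basesStep ([], 0)).1
  (paragraphs, pvB_sweep paragraphs bases spans 0 [] [])

-- ===== PRECONDITION & SPEC =====
-- Pre_ restricts to the natural domain of the function: every span is a [start, end] pair.
-- On malformed spans A raises (IndexError/ValueError at spans[l][1] or at the unpack) except for
-- over-long spans consumed inside the very first paragraph, which A passes through unchanged and
-- on which B happens to agree; the equality is proved only for true pairs.
def Pre_split_text_into_paragraphs_and_paragraph_spans (text : String) (spans : List (List Int)) (min_paragraph_size : Int) : Prop :=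
  ∀ s ∈ spans, s.length = 2
instance (text : String) (spans : List (List Int)) (min_paragraph_size : Int) : Decidable (Pre_split_text_into_paragraphs_and_paragraph_spans text spans min_paragraph_size) := by unfold Pre_split_text_into_paragraphs_and_paragraph_spans; infer_instance

def pvWitness_split_text_into_paragraphs_and_paragraph_spans : String × List (List Int) × Int :=
  ("one two\nthree\nfour five six", [[0, 3], [8, 13], [15, 19]], 3)

def Spec_split_text_into_paragraphs_and_paragraph_spans (text : String) (spans : List (List Int)) (min_paragraph_size : Int) (out : List String × List (List (List Int))) : Prop := out = split_text_into_paragraphs_and_paragraph_spans_alt text spans min_paragraph_size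
instance (text : String) (spans : List (List Int)) (min_paragraph_size : Int) (out : List String × List (List (List Int))) : Decidable (Spec_split_text_into_paragraphs_and_paragraph_spans text spans min_paragraph_size out) := by unfold Spec_split_text_into_paragraphs_and_paragraph_spans; infer_instance

-- ===== CLAIM (what is proved, stated in full; the proofs are below) =====
def Claim_equal_split_text_into_paragraphs_and_paragraph_spans : Prop := ∀ (text : String) (spans : List (List Int)) (min_paragraph_size : Int), Dom_split_text_into_paragraphs_and_paragraph_spans text spans min_paragraph_size → Pre_split_text_into_paragraphs_and_paragraph_spans text spans min_paragraph_size → Spec_split_text_into_paragraphs_and_paragraph_spans text spans min_paragraph_size (split_text_into_paragraphs_and_paragraph_spans text spans min_paragraph_size)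

-- ===== LEMMAS AND PROOFS =====

-- `text.split("\n")` is never empty
theorem pv_go_ne_nil (sep : List Char) : ∀ (fuel : Nat) (l cur : List Char) (acc : List (List Char)), PySem.Chars.splitOn.go sep fuel l cur acc ≠ [] := by
  intro fuel
  induction fuel with
  | zero => intro l cur acc; simp [PySem.Chars.splitOn.go]
  | succ f ih =>
    intro l cur acc
    cases l with
    | nil => simp [PySem.Chars.splitOn.go]
    | cons c rest =>
      rw [PySem.Chars.splitOn.go]
      split_ifs <;> exact ih _ _ _

theorem pv_split_ne_nil (s : String) : (PySem.Str.split? s "\n").getD [] ≠ [] := by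
  simp [PySem.Str.split?, PySem.Chars.split?, PySem.Chars.splitOn]
  intro h
  exact pv_go_ne_nil _ _ _ _ _ h

-- ---- a reference model of the computation: per-paragraph processing with a running offset ----

-- take the spans of one paragraph starting at index k, rebasing by `base`
def pvM_take (spans : List (List Int)) (base plen : Int) (k : Nat)
    (acc : List (List Int)) (fuel : Nat) : Nat × List (List Int) :=
  match fuel with
  | 0 => (k, acc)
  | f+1 =>
    if k < spans.length && decide ((spans.getD k []).getD 1 0 - base < plen) then
      pvM_take spans base plen (k+1)
        (acc ++ [(spans.getD k []).map (fun v => v - base)]) f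
    else (k, acc)

-- the model loop: A's outer loop with a running offset instead of in-place rewrites
def pvM_loop (segments : List String) (sizes : List Int) (minp : Int)
    (spans : List (List Int)) (i k : Nat) (base : Int)
    (paras : List String) (psl : List (List (List Int))) (fuel : Nat) :
    List String × List (List (List Int)) :=
  match fuel with
  | 0 => (paras, psl)
  | f+1 =>
    if i < segments.length then
      let j := (pvA_findJ sizes minp (i+1) (sizes.getD i 0) (segments.length - (i+1))).1
      let paragraph := PySem.Str.join "\n" (PySem.List.slice segments (some (i:Int)) (some (j:Int)))
      let plen := PySem.Str.len paragraph
      let kp := pvM_take spans base plen k [] (spans.length - k)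
      pvM_loop segments sizes minp spans j kp.1 (base + plen + 1)
        (paras ++ [paragraph]) (psl ++ [kp.2]) f
    else (paras, psl)

-- the paragraph list the model (and A) produces from segment index i
def pvParasOf (segments : List String) (sizes : List Int) (minp : Int) (i fuel : Nat) : List String :=
  match fuel with
  | 0 => []
  | f+1 =>
    if i < segments.length then
      let j := (pvA_findJ sizes minp (i+1) (sizes.getD i 0) (segments.length - (i+1))).1
      PySem.Str.join "\n" (PySem.List.slice segments (some (i:Int)) (some (j:Int))) :: pvParasOf segments sizes minp j f
    else []

-- the per-paragraph bucket lists, spans consumed from index k, current first bucket starts as `cur`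
def pvPslCur (plist : List String) (spans : List (List Int)) (k : Nat) (base : Int)
    (cur : List (List Int)) : List (List (List Int)) :=
  match plist with
  | [] => []
  | p :: rest =>
    let kp := pvM_take spans base (PySem.Str.len p) k cur (spans.length - k)
    kp.2 :: pvPslCur rest spans kp.1 (base + PySem.Str.len p + 1) []

-- the shift applied to a span once `base` characters have been emitted
def pvShift (base : Int) (s : List Int) : List Int := s.map (fun v => v - base)

lemma pvA_findL_mono (spans : List (List Int)) (plen : Int) :
    ∀ (fuel l : Nat), l ≤ pvA_findL spans plen l fuel := by
  intro fuel
  induction fuel with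
  | zero => intro l; simp [pvA_findL]
  | succ f ih =>
    intro l
    simp only [pvA_findL]
    split_ifs with h
    · exact Nat.le_trans (Nat.le_succ l) (ih (l+1))
    · exact Nat.le_refl l

lemma pvA_findL_le' (spans : List (List Int)) (plen : Int) :
    ∀ (fuel l : Nat), l ≤ spans.length → pvA_findL spans plen l fuel ≤ spans.length := by
  intro fuel
  induction fuel with
  | zero => intro l hl; simpa [pvA_findL] using hl
  | succ f ih =>
    intro l hl
    simp only [pvA_findL]
    split_ifs with h
    · exact ih (l+1) (by simpa using (Nat.succ_le_of_lt (by simpa using (of_decide_eq_true (by simpa using (Bool.and_elim_left h))))))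
    · exact hl

-- A's l-scan and slice agree with the model's take, under the drop-invariant
lemma pvTake_eq (spans0 spansA : List (List Int)) (base plen : Int)
    (hpre : ∀ s ∈ spans0, s.length = 2) :
    ∀ (fuel k : Nat) (acc : List (List Int)),
      spansA.length = spans0.length →
      k ≤ spans0.length →
      spansA.drop k = (spans0.drop k).map (pvShift base) →
      pvA_findL spansA plen k fuel = (pvM_take spans0 base plen k acc fuel).1 ∧
      acc ++ (spansA.drop k).take (pvA_findL spansA plen k fuel - k)
        = (pvM_take spans0 base plen k acc fuel).2 := by
  intro fuel
  induction fuel with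
  | zero => intro k acc _ _ _; simp [pvA_findL, pvM_take]
  | succ f ih =>
    intro k acc hlen hk hinv
    have hget : spansA[k]? = (spans0[k]?).map (pvShift base) := by
      have h0 := congrArg (fun xs => xs[0]?) hinv
      simpa [List.getElem?_drop] using h0
    simp only [pvA_findL, pvM_take]
    by_cases hkl : k < spans0.length
    · have hkA : k < spansA.length := by omega
      have hsome : spansA[k]? = some (pvShift base (spans0.getD k [])) := by
        rw [hget, List.getElem?_eq_getElem hkl]
        simp [List.getD_eq_getElem?_getD, List.getElem?_eq_getElem hkl]
      have hAk : spansA.getD k [] = pvShift base (spans0.getD k []) := by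
        simp [List.getD_eq_getElem?_getD, hsome]
      have hmem : spans0.getD k [] ∈ spans0 := by
        have hEq : spans0.getD k [] = spans0[k] := by
          simp [List.getD_eq_getElem?_getD, List.getElem?_eq_getElem hkl]
        rw [hEq]; exact List.getElem_mem hkl
      obtain ⟨a, b, hab⟩ := List.length_eq_two.mp (hpre _ hmem)
      have hcond : ((spansA.getD k []).getD 1 0 < plen) ↔ ((spans0.getD k []).getD 1 0 - base < plen) := by
        rw [hAk, hab]; simp [pvShift]
      by_cases hc : (spans0.getD k []).getD 1 0 - base < plen
      · have hcA : (spansA.getD k []).getD 1 0 < plen := hcond.mpr hc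
        rw [if_pos (show (decide (k < spansA.length) && decide ((spansA.getD k []).getD 1 0 < plen)) = true by
              simp only [Bool.and_eq_true, decide_eq_true_eq]; exact ⟨hkA, hcA⟩),
            if_pos (show (decide (k < spans0.length) && decide ((spans0.getD k []).getD 1 0 - base < plen)) = true by
              simp only [Bool.and_eq_true, decide_eq_true_eq]; exact ⟨hkl, hc⟩)]
        have hinv' : spansA.drop (k+1) = (spans0.drop (k+1)).map (pvShift base) := by
          have := congrArg List.tail hinv
          simpa [List.tail_drop, List.map_tail] using this
        obtain ⟨h1, h2⟩ := ih (k+1)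
          (acc ++ [(spans0.getD k []).map (fun v => v - base)])
          hlen hkl hinv'
        refine ⟨h1, ?_⟩
        rw [← h2]
        have hdropA : spansA.drop k = spansA.getD k [] :: spansA.drop (k+1) := by
          rw [List.drop_eq_getElem_cons hkA]
          simp [List.getD_eq_getElem?_getD, List.getElem?_eq_getElem hkA]
        have hmono : k + 1 ≤ pvA_findL spansA plen (k+1) f := pvA_findL_mono spansA plen f (k+1)
        rw [hdropA, hAk]
        simp only [List.append_assoc, List.singleton_append]
        have hstep : pvA_findL spansA plen (k+1) f - k = (pvA_findL spansA plen (k+1) f - (k+1)) + 1 := by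
          omega
        rw [hstep, List.take_succ_cons]
        rfl
      · have hcA : ¬ ((spansA.getD k []).getD 1 0 < plen) := fun h => hc (hcond.mp h)
        rw [if_neg (show ¬ (decide (k < spansA.length) && decide ((spansA.getD k []).getD 1 0 < plen)) = true by
              simp only [Bool.and_eq_true, decide_eq_true_eq]; rintro ⟨-, h⟩; exact hcA h),
            if_neg (show ¬ (decide (k < spans0.length) && decide ((spans0.getD k []).getD 1 0 - base < plen)) = true by
              simp only [Bool.and_eq_true, decide_eq_true_eq]; rintro ⟨-, h⟩; exact hc h)]
        simp
    · have hkA : ¬ k < spansA.length := by omega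
      rw [if_neg (show ¬ (decide (k < spansA.length) && decide ((spansA.getD k []).getD 1 0 < plen)) = true by
            simp only [Bool.and_eq_true, decide_eq_true_eq]; rintro ⟨h, -⟩; exact hkA h),
          if_neg (show ¬ (decide (k < spans0.length) && decide ((spans0.getD k []).getD 1 0 - base < plen)) = true by
            simp only [Bool.and_eq_true, decide_eq_true_eq]; rintro ⟨h, -⟩; exact hkl h)]
      simp

-- A's loop agrees with the model loop under the drop-invariant
lemma pvLoop_eq (segments : List String) (sizes : List Int) (minp : Int) (spans0 : List (List Int))
    (hpre : ∀ s ∈ spans0, s.length = 2) :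
    ∀ (fuel i k : Nat) (base : Int) (spansA : List (List Int))
      (paras : List String) (psl : List (List (List Int))),
      spansA.length = spans0.length →
      k ≤ spans0.length →
      spansA.drop k = (spans0.drop k).map (pvShift base) →
      pvA_loop segments sizes minp i k spansA paras psl fuel
        = pvM_loop segments sizes minp spans0 i k base paras psl fuel := by
  intro fuel
  induction fuel with
  | zero => intro i k base spansA paras psl _ _ _; rfl
  | succ f ih =>
    intro i k base spansA paras psl hlen hk hinv
    simp only [pvA_loop, pvM_loop]
    by_cases hi : i < segments.length
    · rw [if_pos hi, if_pos hi]
      set j := (pvA_findJ sizes minp (i+1) (sizes.getD i 0) (segments.length - (i+1))).1 with hj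
      set paragraph := PySem.Str.join "\n" (PySem.List.slice segments (some (i:Int)) (some (j:Int))) with hp
      set plen := PySem.Str.len paragraph with hpl
      have hfuel : spansA.length - k = spans0.length - k := by omega
      rw [hfuel]
      obtain ⟨h1, h2⟩ := pvTake_eq spans0 spansA base plen hpre (spans0.length - k) k [] hlen hk hinv
      simp only [List.nil_append] at h2
      set l := pvA_findL spansA plen k (spans0.length - k) with hl
      have hlk : k ≤ l := pvA_findL_mono spansA plen (spans0.length - k) k
      have hlle : l ≤ spans0.length := by
        have := pvA_findL_le' spansA plen (spans0.length - k) k (by omega)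
        omega
      have hslice : PySem.List.slice spansA (some (k:Int)) (some (l:Int)) = (spansA.drop k).take (l - k) := by
        rw [PySem.List.slice_natCast]
      have hlenadj : (pvA_adjust spansA l (plen + 1)).length = spans0.length := by
        simp [pvA_adjust]; omega
      have htk : (spansA.take l).length = l := by
        rw [List.length_take]; omega
      have hdropadj : (pvA_adjust spansA l (plen + 1)).drop l
          = (spans0.drop l).map (pvShift (base + plen + 1)) := by
        rw [pvA_adjust, List.drop_append_of_le_length (by omega)]
        have hnil : List.drop l (List.take l spansA) = [] := by
          simp
        rw [hnil, List.nil_append]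
        have hdropl : spansA.drop l = (spans0.drop l).map (pvShift base) := by
          have : spansA.drop l = (spansA.drop k).drop (l - k) := by
            rw [List.drop_drop]; congr 1; omega
          rw [this, hinv, ← List.map_drop, List.drop_drop]
          congr 2; omega
        rw [hdropl, List.map_map]
        apply List.map_congr_left
        intro s hs
        obtain ⟨a, b, rfl⟩ := List.length_eq_two.mp (hpre s (List.mem_of_mem_drop hs))
        simp [pvShift, Function.comp]
        constructor <;> ring
      rw [hslice, h2, h1]
      apply ih
      · rw [← h1]; exact hlenadj
      · rw [← h1]; exact hlle
      · rw [← h1]; exact hdropadj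
    · rw [if_neg hi, if_neg hi]

-- the model loop, staged: paragraphs first, then the per-paragraph buckets
lemma pvLoop_staged (segments : List String) (sizes : List Int) (minp : Int) (spans : List (List Int)) :
    ∀ (fuel i k : Nat) (base : Int) (paras : List String) (psl : List (List (List Int))),
      pvM_loop segments sizes minp spans i k base paras psl fuel
        = (paras ++ pvParasOf segments sizes minp i fuel,
           psl ++ pvPslCur (pvParasOf segments sizes minp i fuel) spans k base []) := by
  intro fuel
  induction fuel with
  | zero => intro i k base paras psl; simp [pvM_loop, pvParasOf, pvPslCur]
  | succ f ih =>
    intro i k base paras psl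
    simp only [pvM_loop, pvParasOf]
    by_cases hi : i < segments.length
    · rw [if_pos hi, if_pos hi]
      rw [ih]
      simp only [pvPslCur]
      simp
    · rw [if_neg hi, if_neg hi]
      simp [pvPslCur]

lemma pvFindJ_mono (sizes : List Int) (minp : Int) :
    ∀ (fuel j : Nat) (acc : Int), j ≤ (pvA_findJ sizes minp j acc fuel).1 := by
  intro fuel
  induction fuel with
  | zero => intro j acc; simp [pvA_findJ]
  | succ f ih =>
    intro j acc
    simp only [pvA_findJ]
    split_ifs with h
    · exact Nat.le_trans (Nat.le_succ j) (ih (j+1) _)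
    · exact Nat.le_refl j

lemma pvParasOf_ge (segments : List String) (sizes : List Int) (minp : Int)
    (fuel i : Nat) (h : segments.length ≤ i) : pvParasOf segments sizes minp i fuel = [] := by
  cases fuel with
  | zero => rfl
  | succ f => simp [pvParasOf, Nat.not_lt.mpr h]

lemma pvParasOf_fuel (segments : List String) (sizes : List Int) (minp : Int) :
    ∀ (fuel i : Nat), segments.length - i ≤ fuel →
      pvParasOf segments sizes minp i fuel = pvParasOf segments sizes minp i (segments.length - i) := by
  intro fuel
  induction fuel using Nat.strong_induction_on with
  | _ fuel ih =>
    intro i hfi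
    cases fuel with
    | zero =>
      have : segments.length - i = 0 := by omega
      rw [this]
    | succ f =>
      by_cases hi : i < segments.length
      · have hsub : segments.length - i = (segments.length - i - 1) + 1 := by omega
        rw [hsub]
        simp only [pvParasOf, if_pos hi]
        set j := (pvA_findJ sizes minp (i+1) (sizes.getD i 0) (segments.length - (i+1))).1 with hj
        have hji : i + 1 ≤ j := pvFindJ_mono sizes minp _ (i+1) _
        have h1 : pvParasOf segments sizes minp j f = pvParasOf segments sizes minp j (segments.length - j) := by
          exact ih f (by omega) j (by omega)
        have h2 : pvParasOf segments sizes minp j (segments.length - i - 1) = pvParasOf segments sizes minp j (segments.length - j) := by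
          exact ih (segments.length - i - 1) (by omega) j (by omega)
        rw [h1, h2]
      · rw [pvParasOf_ge segments sizes minp _ _ (by omega),
            pvParasOf_ge segments sizes minp _ _ (by omega)]


-- B's grouping fold produces exactly the model's paragraphs
lemma pvGroup_eq (segments : List String) (minp : Int)
    (sizes : List Int) (hsz : sizes = segments.map (fun s => ((PySem.Str.split₀ s).length : Int))) :
    ∀ (rest : List String) (m i : Nat) (paras : List String) (size : Int),
      rest = segments.drop m → i < m → m ≤ segments.length →
      pvA_findJ sizes minp (i+1) (sizes.getD i 0) (segments.length - (i+1))
        = pvA_findJ sizes minp m size (segments.length - m) →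
      (let g := rest.foldl (pvB_groupStep minp) (paras, (segments.drop i).take (m - i), size);
       g.1 ++ [PySem.Str.join "\n" g.2.1])
        = paras ++ pvParasOf segments sizes minp i (segments.length - i) := by
  have hszlen : sizes.length = segments.length := by rw [hsz]; simp
  intro rest
  induction rest with
  | nil =>
    intro m i paras size hm hi hmle hinv
    have hmn : m = segments.length := by
      have := congrArg List.length hm
      simp [List.length_drop] at this
      omega
    subst hmn
    simp only [List.foldl_nil]
    have hin : i < segments.length := by omega
    have hsub : segments.length - i = (segments.length - i - 1) + 1 := by omega
    rw [hsub]
    simp only [pvParasOf, if_pos hin]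
    have hj : (pvA_findJ sizes minp (i+1) (sizes.getD i 0) (segments.length - (i+1))).1 = segments.length := by
      rw [hinv]
      have : segments.length - segments.length = 0 := by omega
      rw [this]
      rfl
    rw [hj, pvParasOf_ge segments sizes minp _ _ (le_refl _), PySem.List.slice_natCast,
      (by omega : segments.length - i - 1 + 1 = segments.length - i)]
  | cons seg rest2 ih =>
    intro m i paras size hm hi hmle hinv
    have hdm := hm.symm
    have hmn : m < segments.length := by
      have := congrArg List.length hm
      simp [List.length_drop] at this
      omega
    have hseg : segments.getD m "" = seg := by
      have h0 : segments[m]? = some seg := by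
        have := congrArg (fun xs => xs[0]?) hdm
        simpa [List.getElem?_drop] using this
      simp [List.getD_eq_getElem?_getD, h0]
    have hrest2 : rest2 = segments.drop (m+1) := by
      have := congrArg List.tail hdm
      simpa [List.tail_drop] using this.symm
    have hw : ((PySem.Str.split₀ seg).length : Int) = sizes.getD m 0 := by
      rw [hsz, ← hseg]
      have h0 : segments[m]? = some (segments.getD m "") := by
        rw [List.getElem?_eq_getElem hmn]
        simp [List.getD_eq_getElem?_getD, List.getElem?_eq_getElem hmn]
      have h1 : (List.map (fun s => ((PySem.Str.split₀ s).length : Int)) segments)[m]?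
          = some ((PySem.Str.split₀ (segments.getD m "")).length : Int) := by
        rw [List.getElem?_map, h0]
        rfl
      simp [List.getD_eq_getElem?_getD, h1]
    have hgrp : ((segments.drop i).take (m - i)).isEmpty = false := by
      have hlen0 : ((segments.drop i).take (m - i)).length ≠ 0 := by
        rw [List.length_take, List.length_drop]
        omega
      cases hE : (segments.drop i).take (m - i) with
      | nil => rw [hE] at hlen0; simp at hlen0
      | cons a r => rfl
    simp only [List.foldl_cons, pvB_groupStep, hgrp, Bool.not_false, Bool.true_and]
    by_cases hlt : size + sizes.getD m 0 < minp
    · rw [if_neg (by simp only [Bool.not_eq_true', decide_eq_false_iff_not]; rw [hw]; omega)]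
      have htake : (segments.drop i).take (m - i) ++ [seg] = (segments.drop i).take (m + 1 - i) := by
        have hidx : (segments.drop i)[m - i]? = some seg := by
          rw [List.getElem?_drop, (by omega : i + (m - i) = m)]
          have := congrArg (fun xs => xs[0]?) hdm
          simpa [List.getElem?_drop] using this
        rw [(by omega : m + 1 - i = (m - i) + 1), List.take_add_one, hidx]
        simp
      have hinv' : pvA_findJ sizes minp (i+1) (sizes.getD i 0) (segments.length - (i+1))
          = pvA_findJ sizes minp (m+1) (size + sizes.getD m 0) (segments.length - (m+1)) := by
        rw [hinv, (by omega : segments.length - m = (segments.length - (m+1)) + 1)]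
        simp only [pvA_findJ]
        rw [if_pos]
        simp only [Bool.and_eq_true, decide_eq_true_eq]
        exact ⟨by omega, hlt⟩
      have := ih (m+1) i paras (size + ((PySem.Str.split₀ seg).length : Int)) hrest2 (by omega) (by omega)
        (by rw [hw]; exact hinv')
      rw [htake]
      exact this
    · rw [if_pos (by simp only [Bool.not_eq_true', decide_eq_false_iff_not]; rw [hw]; omega)]
      have hone : ([] : List String) ++ [seg] = (segments.drop m).take (m + 1 - m) := by
        rw [(by omega : m + 1 - m = 1)]
        cases hseg2 : segments.drop m with
        | nil => rw [hseg2] at hdm; exact absurd hdm (by simp)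
        | cons a r =>
          rw [hseg2] at hdm
          simp at hdm ⊢
          exact hdm.1.symm
      have hinv' : pvA_findJ sizes minp (m+1) (sizes.getD m 0) (segments.length - (m+1))
          = pvA_findJ sizes minp (m+1) (0 + ((PySem.Str.split₀ seg).length : Int)) (segments.length - (m+1)) := by
        rw [hw]
        norm_num
      have := ih (m+1) m (paras ++ [PySem.Str.join "\n" ((segments.drop i).take (m - i))])
        (0 + ((PySem.Str.split₀ seg).length : Int)) hrest2 (by omega) (by omega)
        (by rw [hw] at hinv' ⊢; exact hinv')
      rw [hone, this]
      -- now rewrite the RHS paragraph list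
      have hin : i < segments.length := by omega
      have hsub : segments.length - i = (segments.length - i - 1) + 1 := by omega
      conv_rhs => rw [hsub]
      simp only [pvParasOf, if_pos hin]
      have hj : (pvA_findJ sizes minp (i+1) (sizes.getD i 0) (segments.length - (i+1))).1 = m := by
        rw [hinv, (by omega : segments.length - m = (segments.length - (m+1)) + 1)]
        simp only [pvA_findJ]
        rw [if_neg]
        simp only [Bool.and_eq_true, decide_eq_true_eq, not_and]
        intro _
        omega
      rw [hj, PySem.List.slice_natCast]
      rw [pvParasOf_fuel segments sizes minp (segments.length - i - 1) m (by omega)]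
      simp

-- running start offsets
def pvBasesList (ps : List String) (b : Int) : List Int :=
  match ps with
  | [] => []
  | p :: r => b :: pvBasesList r (b + PySem.Str.len p + 1)

def pvBAt (ps : List String) (pi : Nat) : Int :=
  ((ps.take pi).map (fun p => PySem.Str.len p + 1)).sum

lemma pvBases_fold : ∀ (ps : List String) (bl : List Int) (b : Int),
    (ps.foldl pvB_basesStep (bl, b)).1 = bl ++ pvBasesList ps b := by
  intro ps
  induction ps with
  | nil => intro bl b; simp [pvBasesList]
  | cons p r ih =>
    intro bl b
    simp only [List.foldl_cons, pvB_basesStep, pvBasesList]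
    rw [ih]
    simp

lemma pvBasesList_getD : ∀ (pi : Nat) (ps : List String) (b : Int), pi < ps.length →
    (pvBasesList ps b).getD pi 0 = b + pvBAt ps pi := by
  intro pi
  induction pi with
  | zero =>
    intro ps b h
    cases ps with
    | nil => simp at h
    | cons p r => simp [pvBasesList, pvBAt]
  | succ pi ih =>
    intro ps b h
    cases ps with
    | nil => simp at h
    | cons p r =>
      simp only [pvBasesList, List.getD_cons_succ]
      rw [ih r _ (by simpa using h)]
      simp [pvBAt, List.take_succ_cons]
      ring

lemma pvBAt_succ (ps : List String) (pi : Nat) (h : pi < ps.length) :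
    pvBAt ps (pi+1) = pvBAt ps pi + PySem.Str.len (ps.getD pi "") + 1 := by
  unfold pvBAt
  rw [List.take_add_one, List.getElem?_eq_getElem h]
  simp only [Option.toList_some, List.map_append, List.map_cons, List.map_nil, List.sum_append,
    List.sum_cons, List.sum_nil, List.getD_eq_getElem?_getD, List.getElem?_eq_getElem h,
    Option.getD_some]
  ring

-- when the spans are exhausted, the remaining buckets are cur then empties
lemma pvPslCur_exhausted (spans : List (List Int)) :
    ∀ (plist : List String) (k : Nat) (base : Int) (cur : List (List Int)),
      spans.length ≤ k →
      pvPslCur plist spans k base cur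
        = (match plist with | [] => [] | _ :: r => cur :: List.replicate r.length []) := by
  intro plist
  induction plist with
  | nil => intro k base cur h; rfl
  | cons p r ih =>
    intro k base cur h
    have hf : spans.length - k = 0 := by omega
    simp only [pvPslCur, hf, pvM_take]
    rw [ih k _ [] h]
    cases r with
    | nil => rfl
    | cons q r' => simp [List.replicate_succ]

lemma pvFlush_eq (P : Nat) : ∀ (d pi : Nat) (done : List (List (List Int))) (cur : List (List Int)),
    d = P - pi →
    pvB_flush P pi done cur d
      = done ++ (if pi < P then cur :: List.replicate (P - pi - 1) [] else []) := by
  intro d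
  induction d with
  | zero =>
    intro pi done cur h
    have : ¬ pi < P := by omega
    simp [pvB_flush, this]
  | succ f ih =>
    intro pi done cur h
    have hpi : pi < P := by omega
    simp only [pvB_flush, if_pos hpi]
    rw [ih (pi+1) _ [] (by omega)]
    by_cases h2 : pi + 1 < P
    · rw [if_pos h2]
      have : P - pi - 1 = (P - (pi+1) - 1) + 1 := by omega
      rw [this, List.replicate_succ]
      simp
    · rw [if_neg h2]
      have : P - pi - 1 = 0 := by omega
      rw [this]
      simp

-- the two-pointer sweep produces the model's per-paragraph buckets
lemma pvSweep_eq (paras : List String) (spans : List (List Int)) :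
    ∀ (rest : List (List Int)) (k : Nat), rest = spans.drop k →
    ∀ (pi : Nat) (done : List (List (List Int))) (cur : List (List Int)), pi ≤ paras.length →
      pvB_sweep paras (pvBasesList paras 0) rest pi done cur
        = done ++ pvPslCur (paras.drop pi) spans k (pvBAt paras pi) cur := by
  intro rest
  induction rest with
  | nil =>
    intro k hk pi done cur hpi
    have hkS : spans.length ≤ k := by
      have := congrArg List.length hk
      simp [List.length_drop] at this
      omega
    simp only [pvB_sweep]
    rw [pvFlush_eq paras.length _ pi done cur rfl]
    rw [pvPslCur_exhausted spans (paras.drop pi) k _ cur hkS]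
    by_cases h : pi < paras.length
    · rw [if_pos h, List.drop_eq_getElem_cons h]
      show done ++ cur :: List.replicate (paras.length - pi - 1) []
          = done ++ cur :: List.replicate (paras.drop (pi+1)).length []
      rw [List.length_drop, (by omega : paras.length - (pi+1) = paras.length - pi - 1)]
    · rw [if_neg h]
      have : paras.drop pi = [] := List.drop_eq_nil_of_le (by omega)
      rw [this]
  | cons s rest' ihrest =>
    intro k hk pi done cur hpi
    have hdk := hk.symm
    have hkS : k < spans.length := by
      have := congrArg List.length hk
      simp [List.length_drop] at this
      omega
    have hs : spans.getD k [] = s := by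
      have h0 : spans[k]? = some s := by
        have := congrArg (fun xs => xs[0]?) hdk
        simpa [List.getElem?_drop] using this
      simp [List.getD_eq_getElem?_getD, h0]
    have hrest' : rest' = spans.drop (k+1) := by
      have := congrArg List.tail hdk
      simpa [List.tail_drop] using this.symm
    have main : ∀ (d pi : Nat) (done : List (List (List Int))) (cur : List (List Int)),
        paras.length - pi = d → pi ≤ paras.length →
        pvB_sweep paras (pvBasesList paras 0) (s :: rest') pi done cur
          = done ++ pvPslCur (paras.drop pi) spans k (pvBAt paras pi) cur := by
      intro d
      induction d with
      | zero =>
        intro pi done cur hd hpile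
        have hpiP : pi = paras.length := by omega
        have hadv : pvB_adv paras (pvBasesList paras 0) (s.getD 1 0) pi done cur (paras.length - pi)
            = (pi, done, cur) := by
          rw [hd]; rfl
        simp only [pvB_sweep, hadv]
        rw [if_neg (by omega : ¬ pi < paras.length)]
        rw [ihrest (k+1) hrest' pi done cur hpile]
        have hnil : paras.drop pi = [] := List.drop_eq_nil_of_le (by omega)
        rw [hnil]
        rfl
      | succ f ihd =>
        intro pi done cur hd hpile
        have hpiP : pi < paras.length := by omega
        have hdrop : paras.drop pi = paras[pi] :: paras.drop (pi+1) := List.drop_eq_getElem_cons hpiP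
        have hgetD : paras.getD pi "" = paras[pi] := by
          simp [List.getD_eq_getElem?_getD, List.getElem?_eq_getElem hpiP]
        have hb : (pvBasesList paras 0).getD pi 0 = pvBAt paras pi := by
          rw [pvBasesList_getD pi paras 0 hpiP]; ring
        by_cases hc : s.getD 1 0 - pvBAt paras pi < PySem.Str.len (paras[pi])
        · -- the span falls in the current paragraph: no pointer movement
          have hadv : pvB_adv paras (pvBasesList paras 0) (s.getD 1 0) pi done cur (paras.length - pi)
              = (pi, done, cur) := by
            rw [hd]
            simp only [pvB_adv]
            rw [if_neg]
            simp only [Bool.and_eq_true, Bool.not_eq_true', decide_eq_false_iff_not, not_and,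
              decide_eq_true_eq, hb, hgetD]
            intro _
            omega
          simp only [pvB_sweep, hadv]
          rw [if_pos hpiP, hb]
          rw [ihrest (k+1) hrest' pi done (cur ++ [s.map (fun v => v - pvBAt paras pi)]) (by omega)]
          conv_rhs => rw [hdrop]
          simp only [pvPslCur]
          have hfuel : spans.length - k = (spans.length - (k+1)) + 1 := by omega
          rw [hfuel]
          simp only [pvM_take, hs]
          rw [if_pos]
          · conv_lhs => rw [hdrop]
            rfl
          · simp only [Bool.and_eq_true, decide_eq_true_eq]
            exact ⟨hkS, hc⟩
        · -- the span is past the current paragraph: emit the bucket and advance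
          have hstep : pvB_sweep paras (pvBasesList paras 0) (s :: rest') pi done cur
              = pvB_sweep paras (pvBasesList paras 0) (s :: rest') (pi+1) (done ++ [cur]) [] := by
            simp only [pvB_sweep]
            have hadv : pvB_adv paras (pvBasesList paras 0) (s.getD 1 0) pi done cur (paras.length - pi)
                = pvB_adv paras (pvBasesList paras 0) (s.getD 1 0) (pi+1) (done ++ [cur]) [] (paras.length - (pi+1)) := by
              rw [hd]
              simp only [pvB_adv]
              rw [if_pos]
              · have : paras.length - (pi + 1) = f := by omega
                rw [this]
              · simp only [Bool.and_eq_true, Bool.not_eq_true', decide_eq_false_iff_not,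
                  decide_eq_true_eq, hb, hgetD]
                exact ⟨hpiP, hc⟩
            rw [hadv]
          rw [hstep, ihd (pi+1) (done ++ [cur]) [] (by omega) (by omega)]
          conv_rhs => rw [hdrop]
          simp only [pvPslCur]
          have hkp : pvM_take spans (pvBAt paras pi) (PySem.Str.len paras[pi]) k cur (spans.length - k)
              = (k, cur) := by
            have hfuel : spans.length - k = (spans.length - (k+1)) + 1 := by omega
            rw [hfuel]
            simp only [pvM_take, hs]
            rw [if_neg]
            simp only [Bool.and_eq_true, decide_eq_true_eq, not_and]
            intro _
            omega
          rw [hkp]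
          rw [pvBAt_succ paras pi hpiP, hgetD]
          simp
    exact main (paras.length - pi) pi done cur rfl hpi

lemma pv_A_eq_model (text : String) (spans : List (List Int)) (minp : Int)
    (hpre : ∀ s ∈ spans, s.length = 2) :
    split_text_into_paragraphs_and_paragraph_spans text spans minp
      = (let segments := (PySem.Str.split? text "\n").getD []
         let sizes := segments.map (fun s => ((PySem.Str.split₀ s).length : Int))
         pvM_loop segments sizes minp spans 0 0 0 [] [] segments.length) := by
  unfold split_text_into_paragraphs_and_paragraph_spans
  apply pvLoop_eq
  · exact hpre
  · rfl
  · exact Nat.zero_le _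
  · simp only [List.drop_zero]
    conv_lhs => rw [← List.map_id spans]
    apply List.map_congr_left
    intro s _
    simp [pvShift]

theorem pv_main (text : String) (spans : List (List Int)) (minp : Int)
    (hpre : ∀ s ∈ spans, s.length = 2) :
    split_text_into_paragraphs_and_paragraph_spans text spans minp
      = split_text_into_paragraphs_and_paragraph_spans_alt text spans minp := by
  rw [pv_A_eq_model text spans minp hpre]
  unfold split_text_into_paragraphs_and_paragraph_spans_alt
  simp only []
  set segments : List String := (PySem.Str.split? text "\n").getD [] with hsegs
  set sizes : List Int := segments.map (fun s => ((PySem.Str.split₀ s).length : Int)) with hsizes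
  rw [pvLoop_staged]
  have hne : segments ≠ [] := pv_split_ne_nil text
  obtain ⟨s0, rest, hcons⟩ : ∃ s0 rest, segments = s0 :: rest := by
    cases hE : segments with
    | nil => exact absurd hE hne
    | cons a r => exact ⟨a, r, rfl⟩
  have hw0 : ((PySem.Str.split₀ s0).length : Int) = sizes.getD 0 0 := by
    rw [hsizes, hcons]
    simp
  have hparas : (segments.foldl (pvB_groupStep minp) ([], [], 0)).1
      ++ [PySem.Str.join "\n" (segments.foldl (pvB_groupStep minp) ([], [], 0)).2.1]
      = pvParasOf segments sizes minp 0 (segments.length - 0) := by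
    conv_lhs => rw [hcons]
    simp only [List.foldl_cons, pvB_groupStep, List.isEmpty_nil, Bool.not_true, Bool.false_and,
      if_neg (Bool.false_ne_true), List.nil_append]
    have := pvGroup_eq segments minp sizes hsizes rest 1 0 []
      ((0 : Int) + ((PySem.Str.split₀ s0).length : Int))
      (by rw [hcons]; rfl) (by omega) (by rw [hcons]; simp)
      (by rw [hw0]; norm_num)
    simp only [Nat.sub_zero, List.drop_zero] at this ⊢
    have htake : segments.take 1 = [s0] := by rw [hcons]; rfl
    rw [htake] at this
    simpa using this
  rw [Nat.sub_zero] at hparas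
  rw [hparas]
  have hbases : ((pvParasOf segments sizes minp 0 segments.length).foldl pvB_basesStep ([], 0)).1
      = pvBasesList (pvParasOf segments sizes minp 0 segments.length) 0 := by
    rw [pvBases_fold]
    rfl
  rw [hbases]
  rw [pvSweep_eq (pvParasOf segments sizes minp 0 segments.length) spans spans 0 (by rfl) 0 [] []
    (Nat.zero_le _)]
  rfl

-- ===== VERDICT (by name: the statement is the Claim_ definition above) =====
theorem split_text_into_paragraphs_and_paragraph_spans_spec : Claim_equal_split_text_into_paragraphs_and_paragraph_spans := by
  intro text spans minp _hdom hpre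
  unfold Spec_split_text_into_paragraphs_and_paragraph_spans
  exact pv_main text spans minp hpre
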